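-- pv_equiv track=rewrite | github.com/Mn3m0syn3/ao3downloader | ao3downloader/__init__.py | get_current_chapters
-- ===== SOURCE A (Python) =====
-- def get_current_chapters(text: str, index: int) -> str:
--     '''
--     reverse text before index, then read characters from beginning of reversed text
--     until encountering a space, then un-reverse the value you got.
--     we assume here that the text does not include unicode values.
--     this should be safe because ao3 doesn't have localization... I think.
--     '''
--     currentchap = ''
--     for c in reversed(text[:index]):
--         if c.isspace():
--             break
--         else:
--             currentchap += c
--     currentchap = currentchap[::-1]
--     return currentchap
-- ===== SOURCE B (Python) =====
-- def get_current_chapters(text: str, index: int) -> str: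
--     # forward single pass over text[:index]: whitespace resets the
--     # accumulator, any other character extends it; no reversal needed.
--     current = ''
--     for c in text[:index]:
--         if c.isspace():
--             current = ''
--         else:
--             current += c
--     return current
-- ===== Notes on version B (the rewrite author's own statement) =====
-- stated objective: simpler
-- what changed: Replaces A's backward scan over reversed(text[:index]) with a break plus a final [::-1] un-reverse by one forward pass that resets the accumulator on whitespace, so no reversal is needed.
import Mathlib
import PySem

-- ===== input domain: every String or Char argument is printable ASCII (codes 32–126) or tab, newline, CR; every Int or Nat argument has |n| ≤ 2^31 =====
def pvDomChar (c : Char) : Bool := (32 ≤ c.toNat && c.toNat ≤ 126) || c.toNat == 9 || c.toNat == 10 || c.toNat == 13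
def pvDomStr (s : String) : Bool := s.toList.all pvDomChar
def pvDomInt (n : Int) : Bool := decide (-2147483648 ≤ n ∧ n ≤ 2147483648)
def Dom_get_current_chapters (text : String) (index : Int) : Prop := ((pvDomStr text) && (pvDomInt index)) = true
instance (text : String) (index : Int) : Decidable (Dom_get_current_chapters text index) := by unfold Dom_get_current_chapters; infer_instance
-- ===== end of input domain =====

-- B replaces A's backward scan + final reverse by a forward pass that resets the accumulator on whitespace (simpler).


-- ===== PORT A =====
-- A's loop: for c in reversed(text[:index]): if c.isspace(): break else: currentchap += c
def pvLoopA : List Char → List Char → List Char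
  | [], acc => acc
  | c :: cs, acc => if PySem.Chars.isspace c then acc else pvLoopA cs (acc ++ [c])

def get_current_chapters (text : String) (index : Int) : String :=
  let currentchap := pvLoopA (PySem.Str.slice text none (some index)).toList.reverse []
  -- currentchap[::-1]
  String.ofList currentchap.reverse

-- ===== PORT B =====
-- B's loop: for c in text[:index]: current = '' if c.isspace() else current + c
def get_current_chapters_alt (text : String) (index : Int) : String :=
  String.ofList ((PySem.Str.slice text none (some index)).toList.foldl
    (fun acc c => if PySem.Chars.isspace c then [] else acc ++ [c]) [])

-- ===== PRECONDITION & SPEC =====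
def Spec_get_current_chapters (text : String) (index : Int) (out : String) : Prop := out = get_current_chapters_alt text index
instance (text : String) (index : Int) (out : String) : Decidable (Spec_get_current_chapters text index out) := by unfold Spec_get_current_chapters; infer_instance

-- ===== CLAIM (what is proved, stated in full; the proofs are below) =====
def Claim_equal_get_current_chapters : Prop := ∀ (text : String) (index : Int), Dom_get_current_chapters text index → Spec_get_current_chapters text index (get_current_chapters text index)

-- ===== LEMMAS AND PROOFS =====
-- A's backward loop collects the longest non-space prefix of the reversed slice.
theorem pvLoopA_eq (r acc : List Char) :
    pvLoopA r acc = acc ++ r.takeWhile (fun c => !PySem.Chars.isspace c) := by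
  induction r generalizing acc with
  | nil => simp [pvLoopA]
  | cons c cs ih =>
    simp only [pvLoopA, List.takeWhile]
    by_cases h : PySem.Chars.isspace c
    · simp [h]
    · simp [h, ih]

-- B's forward fold computes the reverse of the non-space prefix of the reversed list.
theorem pvFoldB_eq (l : List Char) :
    l.foldl (fun acc c => if PySem.Chars.isspace c then [] else acc ++ [c]) [] =
      (l.reverse.takeWhile (fun c => !PySem.Chars.isspace c)).reverse := by
  induction l using List.reverseRecOn with
  | nil => simp
  | append_singleton l c ih =>
    rw [List.foldl_append]
    by_cases h : PySem.Chars.isspace c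
    · simp [h, List.takeWhile]
    · simp [h, List.takeWhile, ih]

-- ===== VERDICT (by name: the statement is the Claim_ definition above) =====
theorem get_current_chapters_spec : Claim_equal_get_current_chapters := by
  intro text index _
  unfold Spec_get_current_chapters get_current_chapters get_current_chapters_alt
  rw [pvLoopA_eq, pvFoldB_eq]
  simp
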